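-- pv_equiv track=rewrite | github.com/Runax15/cnt | mp/Practice.py | differential_manchester_encoding
-- ===== SOURCE A (Python) =====
-- def differential_manchester_encoding(data):
--     last_state = 1
--     encoded_signal = []
--     for bit in data:
--         if bit == 0:
--             # Transition at the start of the bit period
--             encoded_signal.append(-last_state)
--             encoded_signal.append(last_state)
--         else:
--             # No transition at the start of the bit period
--             encoded_signal.append(last_state)
--             encoded_signal.append(-last_state)
--             last_state = -last_state
--     return encoded_signal
-- ===== SOURCE B (Python) =====
-- def differential_manchester_encoding(data):
--     # Two-pass decomposition: first a prefix scan that records the state in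
--     # effect BEFORE each bit, then a flattening comprehension that emits the
--     # two half-bit levels from (bit, state) pairs.
--     bits = list(data)
--     states = []
--     s = 1
--     for b in bits:
--         states.append(s)
--         if b != 0:
--             s = -s
--     return [v for b, st in zip(bits, states)
--             for v in ((-st, st) if b == 0 else (st, -st))]
-- ===== Notes on version B (the rewrite author's own statement) =====
-- stated objective: alternative
-- what changed: Replaces the single stateful loop that appends halves directly with a prefix scan producing the pre-bit state for every bit followed by a separate flattening comprehension over (bit, state) pairs.
import Mathlib
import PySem

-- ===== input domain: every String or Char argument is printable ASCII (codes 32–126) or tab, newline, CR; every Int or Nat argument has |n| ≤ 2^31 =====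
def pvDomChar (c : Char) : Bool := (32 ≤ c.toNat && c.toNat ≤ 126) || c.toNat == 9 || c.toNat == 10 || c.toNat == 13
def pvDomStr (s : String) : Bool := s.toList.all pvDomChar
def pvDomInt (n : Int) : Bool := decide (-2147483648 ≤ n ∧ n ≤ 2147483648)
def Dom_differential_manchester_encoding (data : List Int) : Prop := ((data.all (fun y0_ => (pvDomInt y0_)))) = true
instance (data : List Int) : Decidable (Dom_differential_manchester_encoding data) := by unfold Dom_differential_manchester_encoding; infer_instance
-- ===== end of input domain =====

-- B replaces A's single stateful append loop by a prefix scan of pre-bit states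
-- followed by a separate flattening pass over (bit, state) pairs (alternative decomposition).


-- ===== PORT A =====
-- loop over data carrying (last_state, encoded_signal)
def differential_manchester_encoding (data : List Int) : List Int :=
  (data.foldl
    (fun (st : Int × List Int) bit =>
      if bit == 0 then (st.1, st.2 ++ [-st.1, st.1])
      else (-st.1, st.2 ++ [st.1, -st.1]))
    (1, [])).2

-- ===== PORT B =====
-- first pass of Source B: the state in effect before each bit
def dmStates (bits : List Int) (s : Int) : List Int :=
  match bits with
  | [] => []
  | b :: rest => s :: dmStates rest (if b ≠ 0 then -s else s)

-- second pass of Source B: flattening comprehension over zip(bits, states)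
def differential_manchester_encoding_alt (data : List Int) : List Int :=
  (data.zip (dmStates data 1)).flatMap
    (fun p => if p.1 == 0 then [-p.2, p.2] else [p.2, -p.2])

-- ===== PRECONDITION & SPEC =====
def Spec_differential_manchester_encoding (data : List Int) (out : List Int) : Prop := out = differential_manchester_encoding_alt data
instance (data : List Int) (out : List Int) : Decidable (Spec_differential_manchester_encoding data out) := by unfold Spec_differential_manchester_encoding; infer_instance

-- ===== CLAIM (what is proved, stated in full; the proofs are below) =====
def Claim_equal_differential_manchester_encoding : Prop := ∀ (data : List Int), Dom_differential_manchester_encoding data → Spec_differential_manchester_encoding data (differential_manchester_encoding data)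

-- ===== LEMMAS AND PROOFS =====
theorem dm_fold_eq (data : List Int) : ∀ (s : Int) (acc : List Int),
    (data.foldl
      (fun (st : Int × List Int) bit =>
        if bit == 0 then (st.1, st.2 ++ [-st.1, st.1])
        else (-st.1, st.2 ++ [st.1, -st.1]))
      (s, acc)).2
    = acc ++ (data.zip (dmStates data s)).flatMap
        (fun p => if p.1 == 0 then [-p.2, p.2] else [p.2, -p.2]) := by
  induction data with
  | nil => intro s acc; simp [dmStates]
  | cons b rest ih =>
    intro s acc
    simp only [List.foldl_cons]
    by_cases hb : b = 0
    · rw [if_pos (by simp [hb]), ih]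
      simp [dmStates, hb]
    · rw [if_neg (by simp [hb]), ih]
      simp [dmStates, hb]

-- ===== VERDICT (by name: the statement is the Claim_ definition above) =====
theorem differential_manchester_encoding_spec : Claim_equal_differential_manchester_encoding := by
  intro data _
  unfold Spec_differential_manchester_encoding differential_manchester_encoding differential_manchester_encoding_alt
  exact dm_fold_eq data 1 []
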